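-- pv_equiv track=rewrite | github.com/AnOnRT/Hash-table | HashSet.py | dl
-- ===== SOURCE A (Python) =====
-- def dl(s):
--     st=''
--     str_arr=[]
--     for i in s:
--         if((i>='A' and i<='Z') or (i>='a' and i<='z')):
--             st+=i
--         else:
--             break
--     st_lower=st.lower()
--     return st_lower
-- ===== SOURCE B (Python) =====
-- import re
--
-- def dl(s):
--     return re.match(r'[A-Za-z]*', s).group().lower()
-- ===== Notes on version B (the rewrite author's own statement) =====
-- stated objective: idiomatic
-- what changed: Replaced the explicit char-by-char loop with break and string accumulation by a single regex match of the leading ASCII-letter run, lowercased.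
import Mathlib
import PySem

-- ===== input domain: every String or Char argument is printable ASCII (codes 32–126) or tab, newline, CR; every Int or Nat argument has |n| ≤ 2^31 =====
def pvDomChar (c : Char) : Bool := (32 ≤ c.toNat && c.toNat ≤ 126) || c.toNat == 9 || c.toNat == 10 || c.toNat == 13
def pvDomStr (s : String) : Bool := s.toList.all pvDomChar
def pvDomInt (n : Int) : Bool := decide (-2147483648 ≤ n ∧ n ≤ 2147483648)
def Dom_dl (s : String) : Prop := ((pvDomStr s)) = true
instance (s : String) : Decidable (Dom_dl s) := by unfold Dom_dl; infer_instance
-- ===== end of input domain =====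

-- B replaces A's explicit accumulate-and-break loop by a regex match of the
-- leading ASCII-letter run (ported as takeWhile), lowercased; objective: idiomatic.

-- ===== PORT A =====
-- A's for-loop with break, accumulating st; then st.lower()
def dlLoop (st : String) : List Char → String
  | [] => st
  | c :: rest =>
    if ('A' ≤ c && c ≤ 'Z') || ('a' ≤ c && c ≤ 'z') then dlLoop (st.push c) rest
    else st

def dl (s : String) : String := PySem.Str.lower (dlLoop "" s.toList)

-- ===== PORT B =====
-- re.match(r'[A-Za-z]*', s).group() = leading run of ASCII letters (takeWhile), then .lower()
def dl_alt (s : String) : String :=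
  PySem.Str.lower (String.ofList (s.toList.takeWhile
    (fun c => ('A' ≤ c && c ≤ 'Z') || ('a' ≤ c && c ≤ 'z'))))

-- ===== PRECONDITION & SPEC =====
def Spec_dl (s : String) (out : String) : Prop := out = dl_alt s
instance (s : String) (out : String) : Decidable (Spec_dl s out) := by unfold Spec_dl; infer_instance

-- ===== CLAIM (what is proved, stated in full; the proofs are below) =====
def Claim_equal_dl : Prop := ∀ (s : String), Dom_dl s → Spec_dl s (dl s)

-- ===== LEMMAS AND PROOFS =====
theorem dlLoop_eq_takeWhile (cs : List Char) : ∀ (st : String),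
    (dlLoop st cs).toList = st.toList ++ cs.takeWhile
      (fun c => ('A' ≤ c && c ≤ 'Z') || ('a' ≤ c && c ≤ 'z')) := by
  induction cs with
  | nil => intro st; simp [dlLoop]
  | cons c rest ih =>
    intro st
    by_cases h : (('A' ≤ c && c ≤ 'Z') || ('a' ≤ c && c ≤ 'z')) = true
    · rw [dlLoop, if_pos h, ih]
      simp [h]
    · rw [dlLoop, if_neg h]
      simp [h]

-- ===== VERDICT (by name: the statement is the Claim_ definition above) =====
theorem dl_spec : Claim_equal_dl := by
  intro s _
  unfold Spec_dl dl dl_alt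
  congr 1
  apply String.ext
  show (dlLoop "" s.toList).toList = _
  rw [dlLoop_eq_takeWhile]
  simp
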